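-- pv_equiv track=rewrite | github.com/thehalleyyoung/deppy | src/deppy/render/predicate_refine.py | is_spanning_tree
-- ===== SOURCE A (Python) =====
-- from typing import (
--     Any,
--     Callable,
--     Dict,
--     FrozenSet,
--     Iterator,
--     List,
--     Optional,
--     Sequence,
--     Set,
--     Tuple,
--     Union,
-- )
--
-- def is_spanning_tree(n: int, edges: Sequence[Tuple[int, int]],
--                      tree_edges: Sequence[Tuple[int, int]]) -> bool:
--     """Check that tree_edges form a spanning tree of graph with n nodes."""
--     if len(tree_edges) != n - 1:
--         return False
--     # Check all tree_edges are valid edges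
--     edge_set = set()
--     for u, v in edges:
--         edge_set.add((min(u, v), max(u, v)))
--     for u, v in tree_edges:
--         if (min(u, v), max(u, v)) not in edge_set:
--             return False
--     # Check connectivity
--     parent = list(range(n))
--
--     def find(x):
--         while parent[x] != x:
--             parent[x] = parent[parent[x]]
--             x = parent[x]
--         return x
--
--     for u, v in tree_edges:
--         pu, pv = find(u), find(v)
--         if pu == pv:
--             return False  # Cycle
--         parent[pu] = pv
--     return len(set(find(i) for i in range(n))) == 1
-- ===== SOURCE B (Python) =====
-- def is_spanning_tree(n, edges, tree_edges):
--     """Check that tree_edges form a spanning tree of graph with n nodes."""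
--     if len(tree_edges) != n - 1:
--         return False
--     edge_set = {(min(u, v), max(u, v)) for u, v in edges}
--     if any((min(u, v), max(u, v)) not in edge_set for u, v in tree_edges):
--         return False
--     # Quick-find component labels: merge by relabelling the whole array.
--     comp = list(range(n))
--     for u, v in tree_edges:
--         cu, cv = comp[u], comp[v]
--         if cu == cv:
--             return False  # Cycle
--         comp = [cv if c == cu else c for c in comp]
--     return all(c == comp[0] for c in comp)
-- ===== Notes on version B (the rewrite author's own statement) =====
-- stated objective: alternative
-- what changed: Replaces the mutable path-halving union-find (parent forest, find with pointer rewriting, final root-set collection) by a quick-find component-label array that merges components by relabelling, so connectivity is read off by comparing labels directly.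
-- outside the precondition, e.g. on is_spanning_tree(3, [(0, 0), (5, 5)], [(0, 0), (5, 5)]): A returns False, B returns False
import Mathlib
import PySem

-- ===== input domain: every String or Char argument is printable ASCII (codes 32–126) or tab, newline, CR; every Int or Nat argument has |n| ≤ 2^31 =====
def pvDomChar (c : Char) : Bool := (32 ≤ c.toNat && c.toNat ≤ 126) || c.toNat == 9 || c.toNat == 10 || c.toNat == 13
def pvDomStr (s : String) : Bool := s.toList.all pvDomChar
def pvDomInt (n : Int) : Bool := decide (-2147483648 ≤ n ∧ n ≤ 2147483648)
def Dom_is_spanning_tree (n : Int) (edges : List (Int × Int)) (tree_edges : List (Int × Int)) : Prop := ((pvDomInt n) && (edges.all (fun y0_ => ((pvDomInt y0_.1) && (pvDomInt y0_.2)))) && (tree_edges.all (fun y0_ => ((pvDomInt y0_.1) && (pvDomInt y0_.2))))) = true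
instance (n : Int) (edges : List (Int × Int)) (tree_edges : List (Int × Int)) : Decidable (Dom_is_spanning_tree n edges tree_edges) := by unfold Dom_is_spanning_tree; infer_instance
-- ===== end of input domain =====

-- B replaces A's mutable path-halving union-find by a quick-find component-label array
-- (merge = relabel the whole array); same return value on every input admitted by Pre_.

-- ===== PORT A =====

-- (u, v) ↦ (min(u,v), max(u,v)), the normalised undirected edge both Pythons compute
def pvNormE (p : Int × Int) : Int × Int := (min p.1 p.2, max p.1 p.2)

-- find(x) with path halving; fuel bounds the while-loop (proved sufficient under Pre_);
-- none = IndexError or fuel exhausted (both unreachable under Pre_)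
def pvFind : Nat → List Int → Int → Option (List Int × Int)
  | 0, _, _ => none
  | fuel+1, parent, x =>
    match PySem.List.pyGet? parent x with
    | none => none
    | some px =>
      if px = x then some (parent, x)
      else
        match PySem.List.pyGet? parent px with
        | none => none
        | some ppx => pvFind fuel (PySem.List.pySetD parent x ppx) ppx

-- 'for u, v in tree_edges: pu, pv = find(u), find(v); if pu == pv: return False; parent[pu] = pv'
-- none = the loop returned False (cycle) or raised (unreachable under Pre_)
def pvUnionLoop : List (Int × Int) → List Int → Option (List Int)
  | [], parent => some parent
  | e :: rest, parent =>
    match pvFind (parent.length + 1) parent e.1 with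
    | none => none
    | some (p1, pu) =>
      match pvFind (p1.length + 1) p1 e.2 with
      | none => none
      | some (p2, pv) =>
        if pu = pv then none
        else pvUnionLoop rest (PySem.List.pySetD p2 pu pv)

-- set(find(i) for i in range(n)): the generator runs the finds sequentially, mutating parent
def pvRootsLoop : List Int → List Int → PySem.Set Int → Option (PySem.Set Int)
  | [], _, s => some s
  | i :: rest, parent, s =>
    match pvFind (parent.length + 1) parent i with
    | none => none
    | some (p1, r) => pvRootsLoop rest p1 (PySem.Set.add s r)

def is_spanning_tree (n : Int) (edges : List (Int × Int)) (tree_edges : List (Int × Int)) : Bool :=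
  if PySem.List.len tree_edges ≠ n - 1 then false
  else
    let edge_set : PySem.Set (Int × Int) :=
      edges.foldl (fun s p => PySem.Set.add s (pvNormE p)) PySem.Set.empty
    if tree_edges.all (fun p => PySem.Set.contains edge_set (pvNormE p)) then
      match pvUnionLoop tree_edges (PySem.List.pyRange 0 n 1) with
      | none => false
      | some parent =>
        match pvRootsLoop (PySem.List.pyRange 0 n 1) parent PySem.Set.empty with
        | none => false
        | some s => PySem.Set.len s == 1
    else false

-- ===== PORT B =====

-- 'for u, v in tree_edges: cu, cv = comp[u], comp[v]; if cu == cv: return False;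
--  comp = [cv if c == cu else c for c in comp]'; none = returned False (or raised, outside Pre_)
def pvCompLoop : List (Int × Int) → List Int → Option (List Int)
  | [], comp => some comp
  | e :: rest, comp =>
    match PySem.List.pyGet? comp e.1, PySem.List.pyGet? comp e.2 with
    | some cu, some cv =>
      if cu = cv then none
      else pvCompLoop rest (comp.map (fun c => if c = cu then cv else c))
    | _, _ => none

def is_spanning_tree_alt (n : Int) (edges : List (Int × Int)) (tree_edges : List (Int × Int)) : Bool :=
  if PySem.List.len tree_edges ≠ n - 1 then false
  else
    if tree_edges.any
        (fun p => !(PySem.Set.contains (PySem.Set.ofList (edges.map pvNormE)) (pvNormE p)))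
      then false
    else
      match pvCompLoop tree_edges (PySem.List.pyRange 0 n 1) with
      | none => false
      | some comp => comp.all (fun c => c == PySem.List.pyGetD comp 0 0)

-- ===== PRECONDITION & SPEC =====

def pvInR (n : Int) (e : Int × Int) : Prop := -n ≤ e.1 ∧ e.1 < n ∧ -n ≤ e.2 ∧ e.2 < n

-- Pre_ excludes the inputs on which both Pythons raise IndexError: the two guards pass
-- (edge count n-1, every tree edge a graph edge) yet some tree-edge endpoint lies outside
-- [-n, n).  The closed form slightly over-excludes: if an earlier tree edge closes a cycle,
-- both programs return False before ever indexing the offending endpoint (see cites).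
def Pre_is_spanning_tree (n : Int) (edges : List (Int × Int)) (tree_edges : List (Int × Int)) : Prop :=
  (PySem.List.len tree_edges = n - 1 ∧ ∀ e ∈ tree_edges, pvNormE e ∈ edges.map pvNormE) →
    ∀ e ∈ tree_edges, pvInR n e
instance (n : Int) (edges : List (Int × Int)) (tree_edges : List (Int × Int)) : Decidable (Pre_is_spanning_tree n edges tree_edges) := by unfold Pre_is_spanning_tree pvInR; infer_instance

def pvWitness_is_spanning_tree : Int × (List (Int × Int)) × (List (Int × Int)) :=
  (3, [(0, 1), (1, 2)], [(0, 1), (1, 2)])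

def Spec_is_spanning_tree (n : Int) (edges : List (Int × Int)) (tree_edges : List (Int × Int)) (out : Bool) : Prop := out = is_spanning_tree_alt n edges tree_edges
instance (n : Int) (edges : List (Int × Int)) (tree_edges : List (Int × Int)) (out : Bool) : Decidable (Spec_is_spanning_tree n edges tree_edges out) := by unfold Spec_is_spanning_tree; infer_instance

-- ===== CLAIM (what is proved, stated in full; the proofs are below) =====
def Claim_equal_is_spanning_tree : Prop := ∀ (n : Int) (edges : List (Int × Int)) (tree_edges : List (Int × Int)), Dom_is_spanning_tree n edges tree_edges → Pre_is_spanning_tree n edges tree_edges → Spec_is_spanning_tree n edges tree_edges (is_spanning_tree n edges tree_edges)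

-- ===== LEMMAS AND PROOFS =====

-- parent viewed as a function on indices
def pvPf (p : List Int) (i : Nat) : Nat := (p.getD i 0).toNat
def pvIsRoot (p : List Int) (i : Nat) : Prop := pvPf p i = i
def pvRootN (p : List Int) (i : Nat) : Nat := (pvPf p)^[p.length] i
-- well-formed union-find state: entries in range, every node reaches a root
def pvWF (p : List Int) : Prop :=
  (∀ i < p.length, 0 ≤ p.getD i 0 ∧ p.getD i 0 < (p.length : Int)) ∧
  (∀ i < p.length, ∃ k, pvIsRoot p ((pvPf p)^[k] i))
-- Python index normalisation
def pvIdx (len : Nat) (x : Int) : Nat := if x < 0 then (x + len).toNat else x.toNat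

theorem pvIdx_lt (len : Nat) (x : Int) (h : PySem.Raise.InRange len x) : pvIdx len x < len := by
  obtain ⟨h1, h2⟩ := h; unfold pvIdx; split <;> omega

theorem pvGet_inr (xs : List Int) (x : Int) (h : PySem.Raise.InRange xs.length x) :
    PySem.List.pyGet? xs x = some (xs.getD (pvIdx xs.length x) 0) := by
  obtain ⟨h1, h2⟩ := h
  by_cases hx : x < 0
  · have heq : xs.length - (-x).toNat = (x + xs.length).toNat := by omega
    have hlt : (x + (xs.length:Int)).toNat < xs.length := by omega
    rw [pvIdx, if_pos hx]
    simp [PySem.List.pyGet?, PySem.List.pyIdx?, if_neg (by omega : ¬ 0 ≤ x), if_pos h1, heq,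
      List.getElem?_eq_getElem hlt, List.getD_eq_getElem?_getD]
  · have hlt : x.toNat < xs.length := by omega
    rw [pvIdx, if_neg hx]
    simp [PySem.List.pyGet?, PySem.List.pyIdx?, if_pos (by omega : (0:Int) ≤ x), if_pos h2,
      List.getElem?_eq_getElem hlt, List.getD_eq_getElem?_getD]

theorem pvSet_inr (xs : List Int) (x : Int) (v : Int) (h : PySem.Raise.InRange xs.length x) :
    PySem.List.pySetD xs x v = xs.set (pvIdx xs.length x) v := by
  obtain ⟨h1, h2⟩ := h
  by_cases hx : x < 0
  · rw [pvIdx, if_pos hx]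
    simp [PySem.List.pySetD, PySem.List.pySet?, PySem.List.pyIdx?,
      if_neg (by omega : ¬ 0 ≤ x), if_pos h1]
    congr 1; omega
  · rw [pvIdx, if_neg hx]
    simp [PySem.List.pySetD, PySem.List.pySet?, PySem.List.pyIdx?,
      if_pos (by omega : (0:Int) ≤ x), if_pos h2]

theorem pvPf_lt {p : List Int} (h : pvWF p) {i : Nat} (hi : i < p.length) : pvPf p i < p.length := by
  obtain ⟨hb, _⟩ := h; have := hb i hi; unfold pvPf; omega

theorem pvIter_lt {p : List Int} (h : pvWF p) {i : Nat} (hi : i < p.length) (k : Nat) :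
    (pvPf p)^[k] i < p.length := by
  induction k generalizing i with
  | zero => simpa
  | succ m ih => rw [Function.iterate_succ_apply]; exact ih (pvPf_lt h hi)

theorem pvRoot_absorb {p : List Int} {r : Nat} (h : pvIsRoot p r) (m : Nat) : (pvPf p)^[m] r = r := by
  induction m with
  | zero => rfl
  | succ k ih => rw [Function.iterate_succ_apply, h, ih]

theorem pvIter_absorb {p : List Int} {i k m : Nat} (h : pvIsRoot p ((pvPf p)^[k] i)) (hm : k ≤ m) :
    (pvPf p)^[m] i = (pvPf p)^[k] i := by
  obtain ⟨t, rfl⟩ := Nat.exists_eq_add_of_le hm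
  rw [Nat.add_comm, Function.iterate_add_apply]
  exact pvRoot_absorb h t

theorem pvWitness_lt {p : List Int} (h : pvWF p) {i : Nat} (hi : i < p.length) :
    ∃ k < p.length, pvIsRoot p ((pvPf p)^[k] i) := by
  obtain ⟨k, hk⟩ := h.2 i hi
  have hdec : DecidablePred (fun m => pvIsRoot p ((pvPf p)^[m] i)) := by
    intro m; unfold pvIsRoot; infer_instance
  have hex : ∃ m, pvIsRoot p ((pvPf p)^[m] i) := ⟨k, hk⟩
  set k₀ := Nat.find hex with hk₀
  refine ⟨k₀, ?_, Nat.find_spec hex⟩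
  -- injectivity of the chain on range (k₀+1)
  have key : ∀ a b : Nat, a < b → b ≤ k₀ → (pvPf p)^[a] i = (pvPf p)^[b] i → False := by
    intro a b hlt hbk hab
    have hroot : pvIsRoot p ((pvPf p)^[k₀ - b + a] i) := by
      have h1 : (pvPf p)^[k₀ - b + a] i = (pvPf p)^[k₀ - b] ((pvPf p)^[a] i) := by
        rw [← Function.iterate_add_apply]
      rw [h1, hab]
      have h2 : (pvPf p)^[k₀ - b] ((pvPf p)^[b] i) = (pvPf p)^[k₀] i := by
        rw [← Function.iterate_add_apply]; congr 1; omega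
      rw [h2]; exact Nat.find_spec hex
    exact Nat.find_min hex (m := k₀ - b + a) (by omega) hroot
  have hinj : Set.InjOn (fun j => (pvPf p)^[j] i) (Finset.range (k₀ + 1)) := by
    intro a ha b hb hab
    simp only [Finset.coe_range, Set.mem_Iio] at ha hb
    rcases Nat.lt_trichotomy a b with hlt | heq | hlt
    · exact absurd hab (fun hh => key a b hlt (by omega) hh)
    · exact heq
    · exact absurd hab.symm (fun hh => key b a hlt (by omega) hh)
  have hmaps : ∀ a ∈ Finset.range (k₀ + 1), (pvPf p)^[a] i ∈ Finset.range p.length := by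
    intro a _; simp [Finset.mem_range]; exact pvIter_lt h hi a
  have := Finset.card_le_card_of_injOn _ hmaps hinj
  simp at this; omega

theorem pvRootN_isRoot {p : List Int} (h : pvWF p) {i : Nat} (hi : i < p.length) :
    pvIsRoot p (pvRootN p i) := by
  obtain ⟨k, hk, hroot⟩ := pvWitness_lt h hi
  unfold pvRootN
  rw [pvIter_absorb hroot (by omega)]; exact hroot

theorem pvRootN_of_isRoot {p : List Int} {i : Nat} (h : pvIsRoot p i) : pvRootN p i = i :=
  pvRoot_absorb h _

theorem pvRootN_step {p : List Int} (h : pvWF p) {i : Nat} (hi : i < p.length) :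
    pvRootN p (pvPf p i) = pvRootN p i := by
  unfold pvRootN
  rw [← Function.iterate_succ_apply, Function.iterate_succ_apply']
  exact pvRootN_isRoot h hi

theorem pvRootN_lt {p : List Int} (h : pvWF p) {i : Nat} (hi : i < p.length) :
    pvRootN p i < p.length := pvIter_lt h hi _

theorem pvRootN_unique {p : List Int} (h : pvWF p) {i k r : Nat} (hi : i < p.length)
    (hk : (pvPf p)^[k] i = r) (hr : pvIsRoot p r) : pvRootN p i = r := by
  rcases Nat.le_total k p.length with hle | hle
  · unfold pvRootN; rw [pvIter_absorb (by rw [hk]; exact hr) hle, hk]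
  · have : (pvPf p)^[k] i = (pvPf p)^[k - p.length] (pvRootN p i) := by
      unfold pvRootN; rw [← Function.iterate_add_apply]; congr 1; omega
    rw [this, pvRoot_absorb (pvRootN_isRoot h hi)] at hk
    exact hk

theorem pvPf_set {p : List Int} {ix : Nat} (hix : ix < p.length) (g : Nat) (j : Nat) :
    pvPf (p.set ix ((g : Nat) : Int)) j = if j = ix then g else pvPf p j := by
  unfold pvPf
  by_cases hj : j = ix
  · subst hj; simp [List.getD_eq_getElem?_getD, List.getElem?_set_self (by omega)]
  · simp [List.getD_eq_getElem?_getD, List.getElem?_set_ne (by omega : ix ≠ j)]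
    exact fun h => absurd h hj

theorem pvUnionT {p : List Int} (h : pvWF p) {ru rv : Nat} (hru : ru < p.length)
    (hrv : rv < p.length) (hr1 : pvIsRoot p ru) (hr2 : pvIsRoot p rv) (hne : ru ≠ rv) :
    pvWF (p.set ru ((rv : Nat) : Int)) ∧
    (∀ j < p.length, pvRootN (p.set ru ((rv : Nat) : Int)) j =
      if pvRootN p j = ru then rv else pvRootN p j) := by
  set p' := p.set ru ((rv : Nat) : Int) with hp'
  have hlen : p'.length = p.length := by simp [hp']
  have hpf : ∀ j, pvPf p' j = if j = ru then rv else pvPf p j := pvPf_set hru rv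
  have hroot' : ∀ j, j ≠ ru → (pvIsRoot p j ↔ pvIsRoot p' j) := by
    intro j hj; unfold pvIsRoot; rw [hpf, if_neg hj]
  have hrvr' : pvIsRoot p' rv := by rw [← hroot' rv (Ne.symm hne)]; exact hr2
  -- reach in p'
  have hwf' : pvWF p' := by
    constructor
    · intro i hi
      rw [hlen] at hi ⊢
      by_cases hij : i = ru
      · subst hij; simp [hp', List.getD_eq_getElem?_getD, List.getElem?_set_self (by omega)]
        omega
      · simp [hp', List.getD_eq_getElem?_getD, List.getElem?_set_ne (by omega : ru ≠ i)]
        rw [← List.getD_eq_getElem?_getD]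
        exact h.1 i hi
    · intro i hi
      rw [hlen] at hi
      obtain ⟨k, hk⟩ := h.2 i hi
      clear hi
      induction k using Nat.strong_induction_on generalizing i with
      | _ k ih =>
        by_cases hir : i = ru
        · rw [hir]
          exact ⟨1, by simpa [Function.iterate_one, hpf] using hrvr'⟩
        · by_cases hroot : pvIsRoot p i
          · exact ⟨0, by simpa using (hroot' i hir).mp hroot⟩
          · have hk1 : 1 ≤ k := by
              rcases Nat.eq_zero_or_pos k with h0 | h1
              · subst h0; exact absurd hk hroot
              · exact h1
            have hk' : pvIsRoot p ((pvPf p)^[k-1] (pvPf p i)) := by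
              rw [← Function.iterate_succ_apply, Nat.succ_eq_add_one,
                (by omega : k - 1 + 1 = k)]
              exact hk
            obtain ⟨k', hk'r⟩ := ih (k-1) (by omega) (pvPf p i) hk'
            refine ⟨k' + 1, ?_⟩
            rw [Function.iterate_succ_apply, hpf, if_neg hir]
            exact hk'r
  -- roots
  refine ⟨hwf', ?_⟩
  intro j hj
  obtain ⟨k, hk⟩ := h.2 j hj
  induction k using Nat.strong_induction_on generalizing j with
  | _ k ih =>
    by_cases hir : j = ru
    · rw [hir, pvRootN_of_isRoot hr1, if_pos rfl]
      have h1 : (pvPf p')^[1] ru = rv := by simp [hpf]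
      exact pvRootN_unique hwf' (show ru < p'.length by omega) h1 hrvr'
    · by_cases hroot : pvIsRoot p j
      · rw [pvRootN_of_isRoot hroot, if_neg hir, pvRootN_of_isRoot ((hroot' j hir).mp hroot)]
      · have hk1 : 1 ≤ k := by
          rcases Nat.eq_zero_or_pos k with h0 | h1
          · subst h0; exact absurd hk hroot
          · exact h1
        have hk' : pvIsRoot p ((pvPf p)^[k-1] (pvPf p j)) := by
          rw [← Function.iterate_succ_apply, Nat.succ_eq_add_one,
            (by omega : k - 1 + 1 = k)]
          exact hk
        have hpfj : pvPf p j < p.length := pvPf_lt h hj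
        have ihr := ih (k-1) (by omega) (pvPf p j) hpfj hk'
        have hstep' : pvRootN p' j = pvRootN p' (pvPf p j) := by
          have : pvPf p' j = pvPf p j := by rw [hpf, if_neg hir]
          rw [← this, pvRootN_step hwf' (by omega)]
        rw [hstep', ihr, pvRootN_step h hj]

theorem pvHalveT {p : List Int} (h : pvWF p) {ix : Nat} (hix : ix < p.length)
    (hnr : ¬ pvIsRoot p ix) :
    (∀ m, (pvPf p)^[m] (pvPf p (pvPf p ix)) ≠ ix) ∧
    (∀ m, (pvPf (p.set ix ((pvPf p (pvPf p ix) : Nat) : Int)))^[m] (pvPf p (pvPf p ix)) =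
      (pvPf p)^[m] (pvPf p (pvPf p ix))) ∧
    pvWF (p.set ix ((pvPf p (pvPf p ix) : Nat) : Int)) ∧
    (∀ j < p.length, pvRootN (p.set ix ((pvPf p (pvPf p ix) : Nat) : Int)) j = pvRootN p j) := by
  set g := pvPf p (pvPf p ix) with hg
  set p' := p.set ix ((g : Nat) : Int) with hp'
  have hlen : p'.length = p.length := by simp [hp']
  have hpf : ∀ j, pvPf p' j = if j = ix then g else pvPf p j := pvPf_set hix g
  have hg_lt : g < p.length := pvPf_lt h (pvPf_lt h hix)
  have hg2 : (pvPf p)^[2] ix = g := by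
    rw [Function.iterate_succ_apply, Function.iterate_one]
  have noReturn : ∀ m, (pvPf p)^[m] g ≠ ix := by
    intro a ha
    have hcyc : (pvPf p)^[a + 2] ix = ix := by
      rw [Function.iterate_add_apply, hg2]; exact ha
    have hper : ∀ t, (pvPf p)^[t * (a + 2)] ix = ix := by
      intro t
      induction t with
      | zero => simp
      | succ m ih =>
        rw [Nat.succ_mul, Function.iterate_add_apply, hcyc, ih]
    obtain ⟨k, hk⟩ := h.2 ix hix
    have habs : (pvPf p)^[(k + 1) * (a + 2)] ix = (pvPf p)^[k] ix :=
      pvIter_absorb hk (by nlinarith)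
    rw [hper (k + 1)] at habs
    rw [← habs] at hk
    exact hnr hk
  have chainEq : ∀ m, (pvPf p')^[m] g = (pvPf p)^[m] g := by
    intro m
    induction m with
    | zero => rfl
    | succ m ih =>
      rw [Function.iterate_succ_apply', Function.iterate_succ_apply', ih, hpf,
        if_neg (noReturn m)]
  refine ⟨noReturn, chainEq, ?_⟩
  have hwf' : pvWF p' := by
    constructor
    · intro i hi
      rw [hlen] at hi
      by_cases hij : i = ix
      · subst hij
        have hset : (p.set i ((g : Nat) : Int))[i]? = some ((g : Nat) : Int) :=
          List.getElem?_set_self (by omega)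
        simp [hp', List.getD_eq_getElem?_getD, hset]
        omega
      · simp [hp', List.getD_eq_getElem?_getD, List.getElem?_set_ne (by omega : ix ≠ i)]
        rw [← List.getD_eq_getElem?_getD]
        exact h.1 i hi
    · intro i hi
      rw [hlen] at hi
      obtain ⟨k, hk⟩ := h.2 i hi
      clear hi
      induction k using Nat.strong_induction_on generalizing i with
      | _ k ih =>
        by_cases hir : i = ix
        · obtain ⟨k₂, hk₂⟩ := h.2 g hg_lt
          refine ⟨k₂ + 1, ?_⟩
          rw [hir, Function.iterate_succ_apply, hpf, if_pos rfl, chainEq]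
          have : pvIsRoot p' ((pvPf p)^[k₂] g) := by
            unfold pvIsRoot
            rw [hpf, if_neg (noReturn k₂)]
            exact hk₂
          exact this
        · by_cases hroot : pvIsRoot p i
          · refine ⟨0, ?_⟩
            unfold pvIsRoot
            simpa [hpf, hir] using hroot
          · have hk1 : 1 ≤ k := by
              rcases Nat.eq_zero_or_pos k with h0 | h1
              · subst h0; exact absurd hk hroot
              · exact h1
            have hk' : pvIsRoot p ((pvPf p)^[k-1] (pvPf p i)) := by
              rw [← Function.iterate_succ_apply, Nat.succ_eq_add_one,
                (by omega : k - 1 + 1 = k)]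
              exact hk
            obtain ⟨k', hk'r⟩ := ih (k-1) (by omega) (pvPf p i) hk'
            refine ⟨k' + 1, ?_⟩
            rw [Function.iterate_succ_apply, hpf, if_neg hir]
            exact hk'r
  refine ⟨hwf', ?_⟩
  have rootIx : pvRootN p' ix = pvRootN p ix := by
    obtain ⟨k₂, hk₂⟩ := h.2 g hg_lt
    have hrr : pvRootN p g = (pvPf p)^[k₂] g := pvRootN_unique h hg_lt rfl hk₂
    have hrix0 : pvRootN p ix = pvRootN p g := by
      rw [hg, pvRootN_step h (pvPf_lt h hix), pvRootN_step h hix]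
    have hrix : pvRootN p ix = (pvPf p)^[k₂] g := hrix0.trans hrr
    have hchain : (pvPf p')^[k₂ + 1] ix = (pvPf p)^[k₂] g := by
      rw [Function.iterate_succ_apply, hpf, if_pos rfl, chainEq]
    have hroot' : pvIsRoot p' ((pvPf p)^[k₂] g) := by
      unfold pvIsRoot; rw [hpf, if_neg (noReturn k₂)]; exact hk₂
    rw [hrix]
    exact pvRootN_unique hwf' (show ix < p'.length by omega) hchain hroot'
  intro j hj
  obtain ⟨k, hk⟩ := h.2 j hj
  induction k using Nat.strong_induction_on generalizing j with
  | _ k ih =>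
    by_cases hir : j = ix
    · rw [hir]; exact rootIx
    · by_cases hroot : pvIsRoot p j
      · rw [pvRootN_of_isRoot hroot, pvRootN_of_isRoot
          (show pvIsRoot p' j by unfold pvIsRoot; rw [hpf, if_neg hir]; exact hroot)]
      · have hk1 : 1 ≤ k := by
          rcases Nat.eq_zero_or_pos k with h0 | h1
          · subst h0; exact absurd hk hroot
          · exact h1
        have hk' : pvIsRoot p ((pvPf p)^[k-1] (pvPf p j)) := by
          rw [← Function.iterate_succ_apply, Nat.succ_eq_add_one,
            (by omega : k - 1 + 1 = k)]
          exact hk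
        have hpfj : pvPf p j < p.length := pvPf_lt h hj
        have ihr := ih (k-1) (by omega) (pvPf p j) hpfj hk'
        have hstep' : pvRootN p' j = pvRootN p' (pvPf p j) := by
          have heq : pvPf p' j = pvPf p j := by rw [hpf, if_neg hir]
          rw [← heq, pvRootN_step hwf' (by omega)]
        rw [hstep', ihr, pvRootN_step h hj]

theorem pvIdx_cast (len : Nat) (i : Nat) : pvIdx len ((i : Nat) : Int) = i := by
  simp [pvIdx]

theorem pvSet_self {p : List Int} {i : Nat} (hi : i < p.length) {v : Int}
    (hv : p.getD i 0 = v) : p.set i v = p := by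
  rw [← hv, List.getD_eq_getElem p 0 hi]
  exact List.set_getElem_self hi


theorem pvFind_spec_nonneg : ∀ k fuel p (ix : Nat), pvWF p → ix < p.length →
    pvIsRoot p ((pvPf p)^[k] ix) → k < fuel →
    ∃ p', pvFind fuel p ((ix : Nat) : Int) = some (p', ((pvRootN p ix : Nat) : Int)) ∧
      p'.length = p.length ∧ pvWF p' ∧ ∀ j < p.length, pvRootN p' j = pvRootN p j := by
  intro k
  induction k using Nat.strong_induction_on with
  | _ k ih =>
    intro fuel p ix h hix hk hkf
    cases fuel with
    | zero => omega
    | succ f =>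
      have hinr : PySem.Raise.InRange p.length ((ix : Nat) : Int) := ⟨by omega, by omega⟩
      have hpx : p.getD ix 0 = ((pvPf p ix : Nat) : Int) := by
        unfold pvPf; rw [Int.toNat_of_nonneg (h.1 ix hix).1]
      have hget : PySem.List.pyGet? p ((ix : Nat) : Int) = some (p.getD ix 0) := by
        rw [pvGet_inr p _ hinr, pvIdx_cast]
      by_cases hroot : pvIsRoot p ix
      · have hpxi : p.getD ix 0 = ((ix : Nat) : Int) := by rw [hpx, hroot]
        refine ⟨p, ?_, rfl, h, fun j _ => rfl⟩
        simp only [pvFind, hget, hpxi, if_true]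
        rw [pvRootN_of_isRoot hroot]
      · have hne : p.getD ix 0 ≠ ((ix : Nat) : Int) := by
          rw [hpx]; intro hc; exact hroot (by exact_mod_cast hc)
        have hpfix : pvPf p ix < p.length := pvPf_lt h hix
        have hget2 : PySem.List.pyGet? p (p.getD ix 0) =
            some ((pvPf p (pvPf p ix) : Nat) : Int) := by
          rw [hpx, pvGet_inr p _ ⟨by omega, by omega⟩, pvIdx_cast]
          congr 1
          exact (Int.toNat_of_nonneg (h.1 (pvPf p ix) hpfix).1).symm
        have hset : PySem.List.pySetD p ((ix : Nat) : Int) ((pvPf p (pvPf p ix) : Nat) : Int) =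
            p.set ix ((pvPf p (pvPf p ix) : Nat) : Int) := by
          rw [pvSet_inr p _ _ hinr, pvIdx_cast]
        have hk1 : 1 ≤ k := by
          rcases Nat.eq_zero_or_pos k with h0 | h1
          · subst h0; exact absurd hk hroot
          · exact h1
        have hstep1 : pvFind (f+1) p ((ix : Nat) : Int) =
            pvFind f (p.set ix ((pvPf p (pvPf p ix) : Nat) : Int))
              ((pvPf p (pvPf p ix) : Nat) : Int) := by
          simp only [pvFind, hget, if_neg hne, hget2, hset]
        by_cases hroot2 : pvIsRoot p (pvPf p ix)
        · -- grandparent equals parent: the write is a no-op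
          have hgg : pvPf p (pvPf p ix) = pvPf p ix := by rw [hroot2]
          have hpp : p.set ix ((pvPf p (pvPf p ix) : Nat) : Int) = p :=
            pvSet_self hix (by rw [hpx, hgg])
          obtain ⟨p', heq, hlen, hwf, hroots⟩ :=
            ih 0 (by omega) f p (pvPf p ix) h hpfix (by simpa using hroot2) (by omega)
          refine ⟨p', ?_, hlen, hwf, hroots⟩
          rw [hstep1, hpp, hgg, heq, pvRootN_step h hix]
        · obtain ⟨noRet, chainEq, hwf', hroots'⟩ := pvHalveT h hix hroot
          set g := pvPf p (pvPf p ix) with hg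
          set p2 := p.set ix ((g : Nat) : Int) with hp2
          have hlen2 : p2.length = p.length := by simp [hp2]
          have hg_lt : g < p.length := pvPf_lt h hpfix
          have hk2 : 2 ≤ k := by
            by_contra h2
            have hk1' : k = 1 := by omega
            rw [hk1'] at hk
            exact hroot2 (by simpa using hk)
          have hwit : pvIsRoot p2 ((pvPf p2)^[k-2] g) := by
            rw [chainEq]
            have : (pvPf p)^[k-2] g = (pvPf p)^[k] ix := by
              rw [hg, ← Function.iterate_succ_apply, ← Function.iterate_succ_apply,
                show (k-2).succ.succ = k by omega]
            rw [this]
            unfold pvIsRoot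
            rw [pvPf_set hix g, if_neg ?_]
            · exact hk
            · rw [← this]; exact noRet (k-2)
          obtain ⟨p', heq, hlen, hwf, hroots⟩ :=
            ih (k-2) (by omega) f p2 g hwf' (by omega ) hwit (by omega)
          refine ⟨p', ?_, by omega, hwf, ?_⟩
          · rw [hstep1, heq]
            congr 2
            rw [hroots' g (pvPf_lt h hpfix)]
            rw [hg, pvRootN_step h hpfix, pvRootN_step h hix]
          · intro j hj
            rw [hroots j (by omega), hroots' j hj]

theorem pvFind_spec {p : List Int} (h : pvWF p) {x : Int}
    (hx : PySem.Raise.InRange p.length x) :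
    ∃ p', pvFind (p.length + 1) p x = some (p', ((pvRootN p (pvIdx p.length x) : Nat) : Int)) ∧
      p'.length = p.length ∧ pvWF p' ∧ ∀ j < p.length, pvRootN p' j = pvRootN p j := by
  have hix : pvIdx p.length x < p.length := pvIdx_lt _ _ hx
  obtain ⟨k, hkl, hk⟩ := pvWitness_lt h hix
  by_cases hxn : 0 ≤ x
  · have hxi : x = ((pvIdx p.length x : Nat) : Int) := by
      unfold pvIdx
      rw [if_neg (not_lt.2 hxn), Int.toNat_of_nonneg hxn]
    rw [hxi]
    exact pvFind_spec_nonneg k (p.length + 1) p (pvIdx p.length x) h hix hk (by omega)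
  · set ix := pvIdx p.length x with hixd
    have hget : PySem.List.pyGet? p x = some (p.getD ix 0) := pvGet_inr p x hx
    have hpx : p.getD ix 0 = ((pvPf p ix : Nat) : Int) := by
      unfold pvPf; rw [Int.toNat_of_nonneg (h.1 ix hix).1]
    have hne : p.getD ix 0 ≠ x := by
      have := (h.1 ix hix).1
      intro hc; omega
    have hpfix : pvPf p ix < p.length := pvPf_lt h hix
    have hget2 : PySem.List.pyGet? p (p.getD ix 0) =
        some ((pvPf p (pvPf p ix) : Nat) : Int) := by
      rw [hpx, pvGet_inr p _ ⟨by omega, by omega⟩, pvIdx_cast]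
      congr 1
      exact (Int.toNat_of_nonneg (h.1 (pvPf p ix) hpfix).1).symm
    have hset : PySem.List.pySetD p x ((pvPf p (pvPf p ix) : Nat) : Int) =
        p.set ix ((pvPf p (pvPf p ix) : Nat) : Int) := pvSet_inr p x _ hx
    have hstep1 : pvFind (p.length + 1) p x =
        pvFind p.length (p.set ix ((pvPf p (pvPf p ix) : Nat) : Int))
          ((pvPf p (pvPf p ix) : Nat) : Int) := by
      simp only [pvFind, hget, if_neg hne, hget2, hset]
    by_cases hroot2 : pvIsRoot p (pvPf p ix)
    · have hgg : pvPf p (pvPf p ix) = pvPf p ix := by rw [hroot2]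
      have hpp : p.set ix ((pvPf p (pvPf p ix) : Nat) : Int) = p :=
        pvSet_self hix (by rw [hpx, hgg])
      obtain ⟨p', heq, hlen, hwf, hroots⟩ :=
        pvFind_spec_nonneg 0 p.length p (pvPf p ix) h hpfix (by simpa using hroot2)
          (by omega)
      refine ⟨p', ?_, hlen, hwf, hroots⟩
      rw [hstep1, hpp, hgg, heq, pvRootN_step h hix]
    · have hroot : ¬ pvIsRoot p ix := by
        intro hr; exact hroot2 (by rw [hr]; exact hr)
      obtain ⟨noRet, chainEq, hwf', hroots'⟩ := pvHalveT h hix hroot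
      set g := pvPf p (pvPf p ix) with hg
      set p2 := p.set ix ((g : Nat) : Int) with hp2
      have hlen2 : p2.length = p.length := by simp [hp2]
      have hg_lt : g < p.length := pvPf_lt h hpfix
      have hk2 : 2 ≤ k := by
        by_contra h2
        rcases (by omega : k = 0 ∨ k = 1) with h0 | h1
        · rw [h0] at hk; exact hroot (by simpa using hk)
        · rw [h1] at hk; exact hroot2 (by simpa using hk)
      have hwit : pvIsRoot p2 ((pvPf p2)^[k-2] g) := by
        rw [chainEq]
        have heqk : (pvPf p)^[k-2] g = (pvPf p)^[k] ix := by
          rw [hg, ← Function.iterate_succ_apply, ← Function.iterate_succ_apply,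
            show (k-2).succ.succ = k by omega]
        rw [heqk]
        unfold pvIsRoot
        rw [pvPf_set hix g, if_neg ?_]
        · exact hk
        · rw [← heqk]; exact noRet (k-2)
      obtain ⟨p', heq, hlen, hwf, hroots⟩ :=
        pvFind_spec_nonneg (k-2) p.length p2 g hwf' (by omega) hwit (by omega)
      refine ⟨p', ?_, by omega, hwf, ?_⟩
      · rw [hstep1, heq]
        congr 2
        rw [hroots' g hg_lt, hg, pvRootN_step h hpfix, pvRootN_step h hix]
      · intro j hj
        rw [hroots j (by omega), hroots' j hj]




def pvCompOf (p : List Int) : List Int :=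
  (List.range p.length).map (fun i => ((pvRootN p i : Nat) : Int))

theorem pvCompOf_length (p : List Int) : (pvCompOf p).length = p.length := by
  simp [pvCompOf]

theorem pvCompOf_get {p : List Int} {x : Int} (hx : PySem.Raise.InRange p.length x) :
    PySem.List.pyGet? (pvCompOf p) x = some ((pvRootN p (pvIdx p.length x) : Nat) : Int) := by
  have hlen : (pvCompOf p).length = p.length := pvCompOf_length p
  have hx' : PySem.Raise.InRange (pvCompOf p).length x := by rw [hlen]; exact hx
  rw [pvGet_inr _ _ hx', hlen]
  congr 1
  exact PySem.List.getD_map_range _ _ _ _ (pvIdx_lt _ _ hx)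

theorem pvLoop_spec : ∀ (T : List (Int × Int)) (p : List Int), pvWF p →
    (∀ e ∈ T, PySem.Raise.InRange p.length e.1 ∧ PySem.Raise.InRange p.length e.2) →
    (pvUnionLoop T p = none ∧ pvCompLoop T (pvCompOf p) = none) ∨
    (∃ p', pvUnionLoop T p = some p' ∧ p'.length = p.length ∧ pvWF p' ∧
      pvCompLoop T (pvCompOf p) = some (pvCompOf p')) := by
  intro T
  induction T with
  | nil => intro p h _; exact Or.inr ⟨p, rfl, rfl, h, rfl⟩
  | cons e T ih =>
    intro p h hT
    obtain ⟨hu, hv⟩ := hT e List.mem_cons_self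
    obtain ⟨p1, hf1, hl1, hw1, hr1⟩ := pvFind_spec h hu
    have hiu : pvIdx p.length e.1 < p.length := pvIdx_lt _ _ hu
    have hiv : pvIdx p.length e.2 < p.length := pvIdx_lt _ _ hv
    have hv1 : PySem.Raise.InRange p1.length e.2 := by rw [hl1]; exact hv
    obtain ⟨p2, hf2, hl2, hw2, hr2⟩ := pvFind_spec hw1 hv1
    set iu := pvIdx p.length e.1 with hiud
    set iv := pvIdx p.length e.2 with hivd
    set ru := pvRootN p iu with hrud
    set rv := pvRootN p iv with hrvd
    have hruv : pvRootN p1 (pvIdx p1.length e.2) = rv := by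
      rw [hl1, ← hivd, hr1 iv hiv]
    have hf2' : pvFind (p.length + 1) p1 e.2 = some (p2, ((rv : Nat) : Int)) := by
      rw [← hl1, hf2, hruv]
    have hru_lt : ru < p.length := pvRootN_lt h hiu
    have hrv_lt : rv < p.length := pvRootN_lt h hiv
    have hgu : PySem.List.pyGet? (pvCompOf p) e.1 = some ((ru : Nat) : Int) := pvCompOf_get hu
    have hgv : PySem.List.pyGet? (pvCompOf p) e.2 = some ((rv : Nat) : Int) := pvCompOf_get hv
    by_cases heq : ru = rv
    · left
      constructor
      · simp only [pvUnionLoop, hf1, hl1, hf2']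
        rw [if_pos (by exact_mod_cast heq)]
      · simp only [pvCompLoop, hgu, hgv]
        rw [if_pos (by exact_mod_cast heq)]
    · have hne' : ((ru : Nat) : Int) ≠ ((rv : Nat) : Int) := by exact_mod_cast heq
      -- A side union write
      have hru2 : PySem.Raise.InRange p2.length ((ru : Nat) : Int) := by
        constructor <;> [omega; (rw [hl2, hl1]; exact_mod_cast hru_lt)]
      have hsetA : PySem.List.pySetD p2 ((ru : Nat) : Int) ((rv : Nat) : Int) =
          p2.set ru ((rv : Nat) : Int) := by
        rw [pvSet_inr p2 _ _ hru2, pvIdx_cast]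
      have hroots2 : ∀ j, j < p.length → pvRootN p2 j = pvRootN p j := by
        intro j hj
        rw [hr2 j (by omega), hr1 j hj]
      have hruroot : pvIsRoot p2 ru := by
        have : ru = pvRootN p2 iu := by rw [hroots2 iu hiu]
        rw [this]
        exact pvRootN_isRoot hw2 (by omega)
      have hrvroot : pvIsRoot p2 rv := by
        have : rv = pvRootN p2 iv := by rw [hroots2 iv hiv]
        rw [this]
        exact pvRootN_isRoot hw2 (by omega)
      obtain ⟨hw3, hroots3⟩ :=
        pvUnionT hw2 (by omega : ru < p2.length) (by omega : rv < p2.length)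
          hruroot hrvroot heq
      set p3 := p2.set ru ((rv : Nat) : Int) with hp3
      have hl3 : p3.length = p.length := by simp [hp3]; omega
      -- B side relabel
      have hcomp3 : (pvCompOf p).map
          (fun c => if c = ((ru : Nat) : Int) then ((rv : Nat) : Int) else c) = pvCompOf p3 := by
        unfold pvCompOf
        rw [List.map_map, hl3]
        apply List.map_congr_left
        intro i hi
        rw [List.mem_range] at hi
        have h3 : pvRootN p3 i = if pvRootN p2 i = ru then rv else pvRootN p2 i :=
          hroots3 i (by omega)
        rw [Function.comp_apply, h3, hroots2 i hi]
        by_cases hc : pvRootN p i = ru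
        · rw [if_pos hc, if_pos (by exact_mod_cast hc)]
        · rw [if_neg hc, if_neg (by exact_mod_cast hc)]
      have hT3 : ∀ e' ∈ T, PySem.Raise.InRange p3.length e'.1 ∧
          PySem.Raise.InRange p3.length e'.2 := by
        intro e' he'
        rw [hl3]
        exact hT e' (List.mem_cons_of_mem e he')
      rcases ih p3 hw3 hT3 with ⟨hA, hB⟩ | ⟨p4, hA, hl4, hw4, hB⟩
      · left
        constructor
        · simp only [pvUnionLoop, hf1, hl1, hf2']
          rw [if_neg hne', hsetA]
          exact hA
        · simp only [pvCompLoop, hgu, hgv]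
          rw [if_neg hne', hcomp3]
          exact hB
      · right
        refine ⟨p4, ?_, by omega, hw4, ?_⟩
        · simp only [pvUnionLoop, hf1, hl1, hf2']
          rw [if_neg hne', hsetA]
          exact hA
        · simp only [pvCompLoop, hgu, hgv]
          rw [if_neg hne', hcomp3]
          exact hB

theorem pvRoots_spec : ∀ (L : List Int) (p : List Int) (s : PySem.Set Int), pvWF p →
    (∀ i ∈ L, PySem.Raise.InRange p.length i) →
    pvRootsLoop L p s =
      some (List.foldl PySem.Set.add s
        (L.map (fun i => ((pvRootN p (pvIdx p.length i) : Nat) : Int)))) := by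
  intro L
  induction L with
  | nil => intro p s _ _; rfl
  | cons i L ih =>
    intro p s h hL
    have hi := hL i List.mem_cons_self
    obtain ⟨p1, hf1, hl1, hw1, hr1⟩ := pvFind_spec h hi
    simp only [pvRootsLoop, hf1, List.map_cons, List.foldl_cons]
    rw [ih p1 _ hw1 (fun j hj => by rw [hl1]; exact hL j (List.mem_cons_of_mem i hj))]
    congr 2
    apply List.map_congr_left
    intro x hx
    have hxr := hL x (List.mem_cons_of_mem i hx)
    rw [hl1, hr1 _ (pvIdx_lt _ _ hxr)]

theorem pvFoldAdd_const {a : Int} : ∀ l : List Int, (∀ c ∈ l, c = a) →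
    List.foldl PySem.Set.add [a] l = [a] := by
  intro l
  induction l with
  | nil => intro _; rfl
  | cons c l ih =>
    intro hall
    rw [List.foldl_cons, hall c List.mem_cons_self,
      show PySem.Set.add [a] a = [a] by simp [PySem.Set.add]]
    exact ih (fun x hx => hall x (List.mem_cons_of_mem c hx))

theorem pvFinal (a : Int) (l : List Int) :
    (PySem.Set.len (PySem.Set.ofList (a :: l)) == 1) =
      (a :: l).all (fun c => c == PySem.List.pyGetD (a :: l) 0 0) := by
  have hget : PySem.List.pyGetD (a :: l) 0 0 = a := PySem.List.pyGetD_zero_cons a l 0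
  rw [hget]
  by_cases hall : ∀ c ∈ a :: l, c = a
  · have h1 : PySem.Set.ofList (a :: l) = [a] := by
      rw [PySem.Set.ofList_eq_foldl, List.foldl_cons,
        show PySem.Set.add [] a = [a] from rfl]
      exact pvFoldAdd_const l (fun c hc => hall c (List.mem_cons_of_mem a hc))
    rw [h1]
    have hr : (a :: l).all (fun c => c == a) = true := by
      rw [List.all_eq_true]
      intro c hc
      simp [hall c hc]
    rw [hr]
    rfl
  · obtain ⟨c, hc, hca⟩ : ∃ c ∈ a :: l, c ≠ a := by
      by_contra hno
      exact hall (fun c hc => by by_contra hne; exact hno ⟨c, hc, hne⟩)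
    have hR : (a :: l).all (fun c => c == a) = false := by
      rw [List.all_eq_false]
      exact ⟨c, hc, by simpa using hca⟩
    have hL : (PySem.Set.len (PySem.Set.ofList (a :: l)) == 1) = false := by
      rw [beq_eq_false_iff_ne]
      intro hone
      have hlen1 : (PySem.Set.ofList (a :: l)).length = 1 := by
        unfold PySem.Set.len at hone
        exact_mod_cast hone
      obtain ⟨x, hx⟩ := List.length_eq_one_iff.mp hlen1
      have ha' : a ∈ PySem.Set.ofList (a :: l) :=
        (PySem.Set.mem_ofList _ _).mpr List.mem_cons_self
      have hc' : c ∈ PySem.Set.ofList (a :: l) :=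
        (PySem.Set.mem_ofList _ _).mpr hc
      rw [hx] at ha' hc'
      simp at ha' hc'
      exact hca (by rw [hc', ha'])
    rw [hL, hR]

-- ===== VERDICT (by name: the statement is the Claim_ definition above) =====
theorem is_spanning_tree_spec : Claim_equal_is_spanning_tree := by
  intro n edges tree_edges hdom hpre
  unfold Spec_is_spanning_tree is_spanning_tree is_spanning_tree_alt
  by_cases hlen : PySem.List.len tree_edges ≠ n - 1
  · rw [if_pos hlen, if_pos hlen]
  · rw [if_neg hlen, if_neg hlen]
    have hlen0 : PySem.List.len tree_edges = n - 1 := not_not.mp hlen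
    have hlen' : (tree_edges.length : Int) = n - 1 := by
      rw [← PySem.List.len_eq]; exact hlen0
    have hes : edges.foldl (fun s p => PySem.Set.add s (pvNormE p)) PySem.Set.empty
        = PySem.Set.ofList (edges.map pvNormE) := by
      rw [PySem.Set.ofList_eq_foldl, List.foldl_map]; rfl
    rw [hes]
    set c := fun p => PySem.Set.contains (PySem.Set.ofList (edges.map pvNormE)) (pvNormE p)
      with hc
    have hanyall : tree_edges.any (fun p => !(c p)) = !(tree_edges.all c) :=
      Eq.symm List.not_all_eq_any_not
    by_cases hv : tree_edges.all c = true
    · rw [if_pos hv, hanyall, hv, Bool.not_true, if_neg (by simp)]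
      have hmem : ∀ e ∈ tree_edges, pvNormE e ∈ edges.map pvNormE := by
        intro e he
        have h1 := List.all_eq_true.mp hv e he
        rw [hc] at h1
        exact (PySem.Set.mem_ofList _ _).mp ((PySem.Set.contains_iff _ _).mp h1)
      have hInR := hpre ⟨hlen0, hmem⟩
      have hn1 : 1 ≤ n := by omega
      set n' := n.toNat with hn'
      have hnn : ((n' : Nat) : Int) = n := by omega
      have hpr : PySem.List.pyRange 0 n 1 = (List.range n').map (fun i => ((i : Nat) : Int)) := by
        rw [PySem.List.pyRange_one]
        simp [hn']
      rw [hpr]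
      set p0 := (List.range n').map (fun i => ((i : Nat) : Int)) with hp0
      have hl0 : p0.length = n' := by simp [hp0]
      have hget0 : ∀ i < n', p0.getD i 0 = ((i : Nat) : Int) := by
        intro i hi
        exact PySem.List.getD_map_range _ _ _ _ hi
      have hroot0 : ∀ i < n', pvIsRoot p0 i := by
        intro i hi
        unfold pvIsRoot pvPf
        rw [hget0 i hi]
        simp
      have hw0 : pvWF p0 := by
        constructor
        · intro i hi
          rw [hl0] at hi
          rw [hget0 i hi, hl0]
          constructor
          · exact_mod_cast Nat.zero_le i
          · exact_mod_cast hi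
        · intro i hi
          rw [hl0] at hi
          exact ⟨0, hroot0 i hi⟩
      have hcomp0 : pvCompOf p0 = p0 := by
        unfold pvCompOf
        rw [hl0, hp0]
        apply List.map_congr_left
        intro i hi
        rw [List.mem_range] at hi
        rw [pvRootN_of_isRoot (hroot0 i hi)]
      have hTin : ∀ e ∈ tree_edges, PySem.Raise.InRange p0.length e.1 ∧
          PySem.Raise.InRange p0.length e.2 := by
        intro e he
        obtain ⟨h1, h2, h3, h4⟩ := hInR e he
        rw [hl0]
        exact ⟨⟨by omega, by omega⟩, ⟨by omega, by omega⟩⟩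
      have hBl : pvCompLoop tree_edges p0 = pvCompLoop tree_edges (pvCompOf p0) := by
        rw [hcomp0]
      rw [hBl]
      rcases pvLoop_spec tree_edges p0 hw0 hTin with ⟨hA, hB⟩ | ⟨p', hA, hl', hw', hB⟩
      · simp only [hA, hB]
      · have hLin : ∀ i ∈ p0, PySem.Raise.InRange p'.length i := by
          intro i hi
          rw [hp0] at hi
          obtain ⟨j, hj, rfl⟩ := List.mem_map.mp hi
          rw [List.mem_range] at hj
          rw [hl', hl0]
          exact ⟨by omega, by exact_mod_cast hj⟩
        have hR := pvRoots_spec p0 p' PySem.Set.empty hw' hLin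
        have hmapped : p0.map (fun i => ((pvRootN p' (pvIdx p'.length i) : Nat) : Int))
            = pvCompOf p' := by
          unfold pvCompOf
          rw [hp0, List.map_map, hl', hl0]
          apply List.map_congr_left
          intro j hj
          rw [Function.comp_apply, pvIdx_cast]
        have hfold : List.foldl PySem.Set.add PySem.Set.empty
            (p0.map (fun i => ((pvRootN p' (pvIdx p'.length i) : Nat) : Int)))
            = PySem.Set.ofList (pvCompOf p') := by
          rw [hmapped, PySem.Set.ofList_eq_foldl]; rfl
        rw [hfold] at hR
        simp only [hA, hB, hR]
        have hne0 : pvCompOf p' ≠ [] := by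
          have : (pvCompOf p').length = n' := by rw [pvCompOf_length, hl', hl0]
          intro hc0
          rw [hc0] at this
          simp at this
          omega
        cases hcl : pvCompOf p' with
        | nil => exact absurd hcl hne0
        | cons a l => exact pvFinal a l
    · have hv' : tree_edges.all c = false := Bool.eq_false_iff.mpr hv
      rw [if_neg (by rw [hv']; simp), hanyall, hv', Bool.not_false, if_pos rfl]
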